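-- pv_equiv track=rewrite | github.com/Tetsuya3850/DSA-Basics | ArraysStrings/shortest_sequentially_covering.py | smallest_sequentially_covering
-- ===== SOURCE A (Python) =====
-- def smallest_sequentially_covering(paragraph, keywords):
--     # Time O(N), Space O(M), where N is the length of the paragraph and M is the length of keywords
--     keyword_to_idx = {k: i for i, k in enumerate(keywords)}
--     latest_occurrence = [-1] * len(keywords)
--     shortest_subarray_length = [float("inf")] * len(keywords)
--     shortest_dist = float('inf')
--     result = (-1, -1)
--     for i, p in enumerate(paragraph):
--         if p in keyword_to_idx:
--             keyword_idx = keyword_to_idx[p]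
--             if keyword_idx == 0:
--                 shortest_subarray_length[keyword_idx] = 1
--             elif shortest_subarray_length[keyword_idx-1] != float('inf'):
--                 distance_to_previous_keyword = (
--                     i - latest_occurrence[keyword_idx - 1])
--                 shortest_subarray_length[keyword_idx] = distance_to_previous_keyword + \
--                     shortest_subarray_length[keyword_idx-1]
--             latest_occurrence[keyword_idx] = i
--             if keyword_idx == len(keywords) - 1 and shortest_subarray_length[-1] < shortest_dist:
--                 shortest_dist = shortest_subarray_length[-1]
--                 result = (i-shortest_dist+1, i)
--     return result
-- ===== SOURCE B (Python) =====
-- def smallest_sequentially_covering(paragraph, keywords):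
--     # Different algorithm: instead of a forward DP over per-keyword arrays,
--     # treat every occurrence of the LAST keyword as a candidate window end and
--     # greedily walk BACKWARD through the paragraph matching keywords
--     # m-2, m-3, ..., 0 (always taking the nearest earlier occurrence, which is
--     # optimal for that end).  Worst case O(N*M) instead of A's O(N+M).
--     keyword_to_idx = {k: i for i, k in enumerate(keywords)}
--     m = len(keywords)
--     best = None
--     result = (-1, -1)
--     for e, p in enumerate(paragraph):
--         if keyword_to_idx.get(p) == m - 1:
--             j = m - 2
--             i = e - 1
--             while j >= 0 and i >= 0:
--                 if keyword_to_idx.get(paragraph[i]) == j: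
--                     j -= 1
--                 i -= 1
--             if j < 0:
--                 length = e - i
--                 if best is None or length < best:
--                     best = length
--                     result = (i + 1, e)
--     return result
-- ===== Notes on version B (the rewrite author's own statement) =====
-- stated objective: alternative
-- what changed: Replaces A's forward dynamic programming over latest_occurrence/shortest_subarray_length arrays by a backward greedy scan: every occurrence of the last keyword is taken as a candidate window end and the paragraph is walked backwards matching keywords m-2..0, recording the strictly best window.
import Mathlib
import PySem

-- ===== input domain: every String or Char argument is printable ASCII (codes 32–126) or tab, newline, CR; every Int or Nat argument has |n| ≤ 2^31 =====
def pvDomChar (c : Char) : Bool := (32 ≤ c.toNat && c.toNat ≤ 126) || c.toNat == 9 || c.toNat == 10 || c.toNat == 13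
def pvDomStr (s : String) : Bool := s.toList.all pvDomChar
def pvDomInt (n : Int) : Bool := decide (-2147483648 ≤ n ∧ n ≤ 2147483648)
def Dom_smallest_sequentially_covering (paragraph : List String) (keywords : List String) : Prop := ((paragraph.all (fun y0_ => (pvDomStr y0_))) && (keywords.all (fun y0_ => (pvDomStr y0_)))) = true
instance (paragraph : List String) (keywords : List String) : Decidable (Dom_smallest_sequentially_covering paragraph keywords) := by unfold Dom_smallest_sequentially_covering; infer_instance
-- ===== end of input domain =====

-- B replaces A's forward DP (latest_occurrence / shortest_subarray_length arrays)
-- by a backward greedy scan from every occurrence of the last keyword (alternative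
-- algorithm, O(N*M) worst case instead of A's O(N+M)).

-- ===== PORT A =====
-- float('inf') appears only as the initial value of shortest_subarray_length
-- entries and shortest_dist; all other values are ints, so we model both as
-- Option Int with none = inf.  sscOptLt is Python's '<' on these values
-- (exact: no NaN can occur, inf < inf is False, int < inf is True).
def sscOptLt (x y : Option Int) : Bool :=
  match x, y with
  | some a, some b => decide (a < b)
  | some _, none => true
  | none, _ => false

-- the three-way update of shortest_subarray_length in the loop body
def sscNewSsl (i j : Int) (lat : List Int) (ssl : List (Option Int)) : List (Option Int) :=
  if j == 0 then PySem.List.pySetD ssl j (some 1)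
  else if (PySem.List.pyGetD ssl (j - 1) none).isSome then
    PySem.List.pySetD ssl j
      (some ((i - PySem.List.pyGetD lat (j - 1) 0) + (PySem.List.pyGetD ssl (j - 1) none).getD 0))
  else ssl

def sscStepA (M : Int) (kti : PySem.Dict String Int)
    (st : List Int × List (Option Int) × Option Int × (Int × Int))
    (ip : Int × String) : List Int × List (Option Int) × Option Int × (Int × Int) :=
  match kti.get? ip.2 with                                -- 'if p in keyword_to_idx: keyword_idx = keyword_to_idx[p]'
  | none => st
  | some j =>
    let lat := st.1
    let ssl := st.2.1
    let dist := st.2.2.1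
    let res := st.2.2.2
    let i := ip.1
    let ssl' := sscNewSsl i j lat ssl
    let lat' := PySem.List.pySetD lat j i
    let last := PySem.List.pyGetD ssl' (-1) none          -- shortest_subarray_length[-1]
    if j == M - 1 && sscOptLt last dist then
      (lat', ssl', last, (i - last.getD 0 + 1, i))
    else
      (lat', ssl', dist, res)

def smallest_sequentially_covering (paragraph : List String) (keywords : List String) : Int × Int :=
  let kti := (PySem.List.enumerate keywords 0).foldl
    (fun d ik => d.insert ik.2 ik.1) PySem.Dict.empty
  let lat : List Int := List.replicate keywords.length (-1)
  let ssl : List (Option Int) := List.replicate keywords.length none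
  ((PySem.List.enumerate paragraph 0).foldl
    (sscStepA (keywords.length : Int) kti) (lat, ssl, none, (-1, -1))).2.2.2

-- ===== PORT B =====
-- the backward while loop 'while j >= 0 and i >= 0: …' as structural recursion
-- on the fuel n = i + 1 (so fuel 0 means i = -1); paragraph[i] is always
-- accessed with 0 <= i < len(paragraph), so List.getD is exact here
def sscBack (kti : PySem.Dict String Int) (pg : List String) : Int → Nat → Int × Int
  | j, 0 => (j, -1)
  | j, n + 1 =>
    if j < 0 then (j, (n : Int))
    else sscBack kti pg (if kti.get? (pg.getD n "") == some j then j - 1 else j) n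

def sscStepB (M : Int) (kti : PySem.Dict String Int) (pg : List String)
    (st : Option Int × (Int × Int)) (ep : Int × String) : Option Int × (Int × Int) :=
  if kti.get? ep.2 == some (M - 1) then                   -- 'if keyword_to_idx.get(p) == m - 1'
    let r := sscBack kti pg (M - 2) ep.1.toNat            -- j = m-2, i = e-1
    if r.1 < 0 then
      let len := ep.1 - r.2
      if st.1.elim true (fun b => decide (len < b)) then (some len, (r.2 + 1, ep.1))
      else st
    else st
  else st

def smallest_sequentially_covering_alt (paragraph : List String) (keywords : List String) : Int × Int :=
  let kti := (PySem.List.enumerate keywords 0).foldl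
    (fun d ik => d.insert ik.2 ik.1) PySem.Dict.empty
  ((PySem.List.enumerate paragraph 0).foldl
    (sscStepB (keywords.length : Int) kti paragraph) (none, (-1, -1))).2

-- ===== PRECONDITION & SPEC =====
def Spec_smallest_sequentially_covering (paragraph : List String) (keywords : List String) (out : Int × Int) : Prop := out = smallest_sequentially_covering_alt paragraph keywords
instance (paragraph : List String) (keywords : List String) (out : Int × Int) : Decidable (Spec_smallest_sequentially_covering paragraph keywords out) := by unfold Spec_smallest_sequentially_covering; infer_instance

-- ===== CLAIM (what is proved, stated in full; the proofs are below) =====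
def Claim_equal_smallest_sequentially_covering : Prop := ∀ (paragraph : List String) (keywords : List String), Dom_smallest_sequentially_covering paragraph keywords → Spec_smallest_sequentially_covering paragraph keywords (smallest_sequentially_covering paragraph keywords)

-- ===== LEMMAS AND PROOFS =====

lemma ssc_getD_set {α : Type} (xs : List α) (n m : Nat) (v d : α) (h : n < xs.length) :
    (xs.set n v).getD m d = if m = n then v else xs.getD m d := by
  simp only [List.getD_eq_getElem?_getD, List.getElem?_set]
  rcases eq_or_ne m n with rfl | hmn
  · simp [h]
  · simp [hmn, hmn.symm]

lemma ssc_pyGetD_neg_one_eq_getD {α : Type} (xs : List α) (d : α) (h : xs ≠ []) :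
    PySem.List.pyGetD xs (-1) d = xs.getD (xs.length - 1) d := by
  rw [PySem.List.pyGetD_neg_one xs d h, List.getLast_eq_getElem,
    List.getD_eq_getElem xs d (by cases xs <;> simp_all)]

lemma ssc_getD_append {α : Type} (pre rest : List α) (x : α) (d : α) :
    (pre ++ x :: rest).getD pre.length d = x := by
  rw [List.getD_eq_getElem?_getD, List.getElem?_append_right (le_refl _)]
  simp

-- every value stored by the keyword_to_idx fold satisfies P if all inserted values do
lemma ssc_fold_insert_values {P : Int → Prop} :
    ∀ (l : List (Int × String)) (d : PySem.Dict String Int),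
      (∀ k v, d.get? k = some v → P v) → (∀ ik ∈ l, P ik.1) →
      ∀ k v, (l.foldl (fun d ik => d.insert ik.2 ik.1) d).get? k = some v → P v := by
  intro l
  induction l with
  | nil => intro d hd _ k v h; exact hd k v h
  | cons x xs ih =>
    intro d hd hl k v h
    refine ih _ ?_ (fun ik hik => hl ik (List.mem_cons_of_mem _ hik)) k v h
    intro k' v' h'
    rw [PySem.Dict.get?_insert] at h'
    split at h'
    · exact (Option.some.inj h') ▸ hl x List.mem_cons_self
    · exact hd _ _ h'

lemma ssc_dict_range (keywords : List String) (p : String) (j : Int)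
    (h : ((PySem.List.enumerate keywords 0).foldl
        (fun d ik => d.insert ik.2 ik.1) PySem.Dict.empty).get? p = some j) :
    0 ≤ j ∧ j < (keywords.length : Int) := by
  refine ssc_fold_insert_values (P := fun v => 0 ≤ v ∧ v < (keywords.length : Int))
    _ _ (by intro k v h'; simp [PySem.Dict.get?_empty] at h') ?_ p j h
  intro ik hik
  rw [PySem.List.mem_enumerate_iff] at hik
  obtain ⟨k, hk, rfl⟩ := hik
  refine ⟨by simp, by simpa using hk⟩

-- occurrence of keyword level j at paragraph position p
def sscOcc (kti : PySem.Dict String Int) (pg : List String) (j : Int) (p : Nat) : Prop :=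
  kti.get? (pg.getD p "") = some j

-- the window produced by B's backward greedy scan at end-fuel e for top level j
def sscW (kti : PySem.Dict String Int) (pg : List String) (j : Int) (e : Nat) : Option Int :=
  let r := sscBack kti pg (j - 1) e
  if r.1 < 0 then some ((e : Int) - r.2) else none

-- A's latest_occurrence entry characterised: last occurrence of level j below t
def sscLast (kti : PySem.Dict String Int) (pg : List String) (t : Nat) (j L : Int) : Prop :=
  (L = -1 ∧ ∀ p : Nat, p < t → ¬ sscOcc kti pg j p) ∨
  (0 ≤ L ∧ L < (t : Int) ∧ sscOcc kti pg j L.toNat ∧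
    ∀ p : Nat, L < (p : Int) → p < t → ¬ sscOcc kti pg j p)

-- the simulation invariant after processing the first t paragraph tokens
def sscInv2 (kti : PySem.Dict String Int) (pg : List String) (m t : Nat)
    (a : List Int × List (Option Int) × Option Int × (Int × Int))
    (b : Option Int × (Int × Int)) : Prop :=
  a.1.length = m ∧ a.2.1.length = m ∧ a.2.2.1 = b.1 ∧ a.2.2.2 = b.2 ∧
  (∀ jn : Nat, jn < m → sscLast kti pg t jn (a.1.getD jn 0)) ∧
  (∀ jn : Nat, jn < m → a.2.1.getD jn none =
    (if a.1.getD jn 0 < 0 then none else sscW kti pg jn ((a.1.getD jn 0).toNat)))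

-- sscBack at level 0-1 (= -1) succeeds immediately, giving length 1
lemma sscW_zero (kti : PySem.Dict String Int) (pg : List String) (e : Nat) :
    sscW kti pg 0 e = some 1 := by
  cases e with
  | zero => simp [sscW, sscBack]
  | succ n =>
    simp only [sscW, sscBack, zero_sub]
    norm_num

-- if level j never occurs below n, the scan stays stuck at level j
lemma sscBack_stuck (kti : PySem.Dict String Int) (pg : List String) (j : Int) (hj : 0 ≤ j) :
    ∀ n : Nat, (∀ p : Nat, p < n → ¬ sscOcc kti pg j p) → sscBack kti pg j n = (j, -1) := by
  intro n
  induction n with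
  | zero => intro _; rfl
  | succ n ih =>
    intro h
    have hocc : (kti.get? (pg.getD n "") == some j) = false := by
      rw [beq_eq_false_iff_ne]
      exact h n (Nat.lt_succ_self n)
    simp only [sscBack, if_neg (by omega : ¬ j < 0), hocc, Bool.false_eq_true, if_false]
    exact ih (fun p hp => h p (Nat.lt_succ_of_lt hp))

-- skipping down to the last occurrence L of level j below n
lemma sscBack_skip (kti : PySem.Dict String Int) (pg : List String) (j : Int) (hj : 0 ≤ j)
    (L : Nat) (hocc : sscOcc kti pg j L) :
    ∀ n : Nat, L < n → (∀ p : Nat, L < p → p < n → ¬ sscOcc kti pg j p) →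
      sscBack kti pg j n = sscBack kti pg (j - 1) L := by
  intro n
  induction n with
  | zero => intro h; omega
  | succ n ih =>
    intro hLn hno
    rcases Nat.lt_or_ge L n with hlt | hge
    · have hocc' : (kti.get? (pg.getD n "") == some j) = false := by
        rw [beq_eq_false_iff_ne]
        exact hno n (by exact_mod_cast hlt) (Nat.lt_succ_self n)
      simp only [sscBack, if_neg (by omega : ¬ j < 0), hocc', Bool.false_eq_true, if_false]
      exact ih hlt (fun p h1 h2 => hno p h1 (Nat.lt_succ_of_lt h2))
    · have hLe : L = n := by omega
      subst hLe
      have hocc' : (kti.get? (pg.getD L "") == some j) = true := beq_iff_eq.mpr hocc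
      simp only [sscBack, if_neg (by omega : ¬ j < 0), hocc', if_true]

-- success is monotone when the top level drops
lemma sscBack_mono_level (kti : PySem.Dict String Int) (pg : List String) :
    ∀ (n : Nat) (j : Int), (sscBack kti pg j n).1 < 0 → (sscBack kti pg (j - 1) n).1 < 0 := by
  intro n
  induction n with
  | zero => intro j h; simp only [sscBack] at h ⊢; omega
  | succ n ih =>
    intro j h
    by_cases hj : j < 0
    · simp only [sscBack, if_pos (by omega : j - 1 < 0)]; omega
    · simp only [sscBack, if_neg hj] at h
      by_cases hj1 : j - 1 < 0
      · simp only [sscBack, if_pos hj1]; omega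
      · simp only [sscBack, if_neg hj1]
        by_cases hocc : kti.get? (pg.getD n "") = some j
        · have h1 : (kti.get? (pg.getD n "") == some j) = true := beq_iff_eq.mpr hocc
          have h2 : (kti.get? (pg.getD n "") == some (j - 1)) = false := by
            rw [beq_eq_false_iff_ne, hocc]
            intro hc
            have := Option.some.inj hc
            omega
          simp only [h1, if_true] at h
          simp only [h2, Bool.false_eq_true, if_false]
          exact h
        · have h1 : (kti.get? (pg.getD n "") == some j) = false := beq_eq_false_iff_ne.mpr hocc
          rw [h1] at h
          simp only [Bool.false_eq_true, if_false] at h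
          by_cases hocc1 : kti.get? (pg.getD n "") = some (j - 1)
          · have h2 : (kti.get? (pg.getD n "") == some (j - 1)) = true := beq_iff_eq.mpr hocc1
            simp only [h2, if_true]
            exact ih (j - 1) (ih j h)
          · have h2 : (kti.get? (pg.getD n "") == some (j - 1)) = false :=
              beq_eq_false_iff_ne.mpr hocc1
            rw [h2]
            simpa using ih j h

-- success is monotone in the fuel
lemma sscBack_mono_fuel (kti : PySem.Dict String Int) (pg : List String) (j : Int)
    (n n' : Nat) (hle : n ≤ n') (h : (sscBack kti pg j n).1 < 0) :
    (sscBack kti pg j n').1 < 0 := by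
  induction n' with
  | zero =>
    have : n = 0 := by omega
    subst this; exact h
  | succ n' ih =>
    rcases Nat.lt_or_ge n (n' + 1) with hlt | hge
    · have hsucc := ih (by omega)
      by_cases hj : j < 0
      · simp only [sscBack, if_pos hj]; omega
      · simp only [sscBack, if_neg hj]
        by_cases hocc : (kti.get? (pg.getD n' "") == some j) = true
        · simp only [hocc, if_true]
          exact sscBack_mono_level kti pg n' j hsucc
        · rw [Bool.not_eq_true] at hocc
          simp only [hocc, Bool.false_eq_true, if_false]
          exact hsucc
    · have : n = n' + 1 := by omega
      subst this; exact h

-- ===== VERDICT helpers: the step and fold simulation =====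

-- a sscLast certificate survives a step that does not touch level j
lemma ssc_last_extend (kti : PySem.Dict String Int) (pg : List String) (t : Nat)
    (j L : Int) (h : sscLast kti pg t j L) (hno : ¬ sscOcc kti pg j t) :
    sscLast kti pg (t + 1) j L := by
  rcases h with ⟨h1, h2⟩ | ⟨h1, h2, h3, h4⟩
  · left
    refine ⟨h1, fun p hp => ?_⟩
    rcases Nat.lt_succ_iff_lt_or_eq.mp hp with hlt | rfl
    · exact h2 p hlt
    · exact hno
  · right
    refine ⟨h1, by push_cast; omega, h3, fun p hp1 hp2 => ?_⟩
    rcases Nat.lt_succ_iff_lt_or_eq.mp hp2 with hlt | rfl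
    · exact h4 p hp1 hlt
    · exact hno

-- if the level-(j-1) invariant value is none, the backward scan from t fails at level j-1
lemma ssc_fail_top (kti : PySem.Dict String Int) (pg : List String) (jm1 : Int)
    (hj : 0 ≤ jm1) (L : Int) (t : Nat) (hlast : sscLast kti pg t jm1 L)
    (hS : (if L < 0 then (none : Option Int) else sscW kti pg jm1 L.toNat) = none) :
    ¬ (sscBack kti pg jm1 t).1 < 0 := by
  rcases hlast with ⟨-, h2⟩ | ⟨h1, h2, h3, h4⟩
  · rw [sscBack_stuck kti pg jm1 hj t h2]
    simpa using hj
  · rw [if_neg (by omega)] at hS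
    rw [sscBack_skip kti pg jm1 hj L.toNat h3 t (by omega)
      (fun p hp1 hp2 => h4 p (by omega) hp2)]
    simp only [sscW] at hS
    intro hc
    rw [if_pos hc] at hS
    exact Option.some_ne_none _ hS

-- core update fact: after processing an occurrence of level jn at position t,
-- the ssl entry at jn is exactly the greedy window value at fuel t
lemma ssc_key (kti : PySem.Dict String Int) (pg : List String) (m t : Nat)
    (lat : List Int) (ssl : List (Option Int)) (hl2 : ssl.length = m)
    (hlast : ∀ jn : Nat, jn < m → sscLast kti pg t jn (lat.getD jn 0))
    (hssl : ∀ jn : Nat, jn < m → ssl.getD jn none =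
      (if lat.getD jn 0 < 0 then none else sscW kti pg jn ((lat.getD jn 0).toNat)))
    (jn : Nat) (hjnm : jn < m) :
    (sscNewSsl (t : Int) (jn : Int) lat ssl).length = m ∧
    (sscNewSsl (t : Int) (jn : Int) lat ssl).getD jn none = sscW kti pg jn t ∧
    (∀ jn' : Nat, jn' ≠ jn →
      (sscNewSsl (t : Int) (jn : Int) lat ssl).getD jn' none = ssl.getD jn' none) := by
  unfold sscNewSsl
  by_cases hjz : jn = 0
  · subst hjz
    simp only [Nat.cast_zero, beq_self_eq_true, if_true]
    have h0 : PySem.List.pySetD ssl (0 : Int) (some 1) = ssl.set 0 (some 1) := by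
      simpa using PySem.List.pySetD_of_nonneg (xs := ssl) (i := 0) (v := some 1) le_rfl
    rw [h0]
    refine ⟨by simpa using hl2, ?_, ?_⟩
    · rw [ssc_getD_set _ _ _ _ _ (by omega), if_pos rfl, sscW_zero]
    · intro jn' hne
      rw [ssc_getD_set _ _ _ _ _ (by omega), if_neg hne]
  · have hb0 : ((jn : Int) == 0) = false := by
      rw [beq_eq_false_iff_ne]; exact_mod_cast hjz
    have hcast : ((jn : Int) - 1) = ((jn - 1 : Nat) : Int) := by omega
    simp only [hb0, Bool.false_eq_true, if_false, hcast, PySem.List.pyGetD_natCast,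
      PySem.List.pySetD_natCast]
    have hprevL := hlast (jn - 1) (by omega)
    have hprevS := hssl (jn - 1) (by omega)
    cases hS : ssl.getD (jn - 1) none with
    | none =>
      simp only [Option.isSome_none, Bool.false_eq_true, if_false]
      have hfail := ssc_fail_top kti pg ((jn - 1 : Nat) : Int) (by omega)
        (lat.getD (jn - 1) 0) t hprevL (by rw [← hprevS]; exact hS)
      have hWnone : sscW kti pg jn t = none := by
        simp only [sscW, hcast]
        exact if_neg hfail
      refine ⟨hl2, ?_, ?_⟩
      · rw [hWnone, hssl jn hjnm]
        by_cases hL : lat.getD jn 0 < 0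
        · rw [if_pos hL]
        · rw [if_neg hL]
          rcases hlast jn hjnm with ⟨hm1, -⟩ | ⟨-, hlt, -, -⟩
          · omega
          · have hmono : ¬ (sscBack kti pg ((jn - 1 : Nat) : Int) (lat.getD jn 0).toNat).1 < 0 :=
              fun hc => hfail (sscBack_mono_fuel kti pg _ _ t (by omega) hc)
            simp only [sscW, hcast]
            exact if_neg hmono
      · intro _ _
        trivial
    | some v =>
      simp only [Option.isSome_some, if_true, Option.getD_some]
      have hL1 : ¬ lat.getD (jn - 1) 0 < 0 := by
        intro hc; rw [if_pos hc] at hprevS; rw [hS] at hprevS; simp at hprevS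
      rw [if_neg hL1] at hprevS
      rcases hprevL with ⟨hm1, -⟩ | ⟨hge, hlt, hocc, hno⟩
      · omega
      set L1 := lat.getD (jn - 1) 0 with hL1def
      have hWv : sscW kti pg ((jn - 1 : Nat) : Int) L1.toNat = some v := by
        rw [← hprevS, hS]
      simp only [sscW] at hWv
      set r1 := sscBack kti pg (((jn - 1 : Nat) : Int) - 1) L1.toNat with hr1
      have hr1neg : r1.1 < 0 := by
        by_contra hc
        rw [if_neg hc] at hWv
        simp at hWv
      rw [if_pos hr1neg] at hWv
      have hv : v = (L1.toNat : Int) - r1.2 := (Option.some.inj hWv).symm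
      have hskip : sscBack kti pg ((jn - 1 : Nat) : Int) t = r1 := by
        rw [sscBack_skip kti pg _ (by omega) L1.toNat hocc t (by omega)
          (fun p hp1 hp2 => hno p (by omega) hp2)]
      have hW : sscW kti pg jn t = some ((t : Int) - r1.2) := by
        simp only [sscW]
        rw [hcast, hskip, if_pos hr1neg]
      refine ⟨by simpa using hl2, ?_, ?_⟩
      · rw [ssc_getD_set _ _ _ _ _ (by rw [hl2]; exact hjnm), if_pos rfl, hW]
        congr 1
        omega
      · intro jn' hne
        rw [ssc_getD_set _ _ _ _ _ (by rw [hl2]; exact hjnm), if_neg hne]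

lemma ssc_step2 (kti : PySem.Dict String Int) (pre : List String) (x : String)
    (rest : List String) (m : Nat)
    (hk : ∀ p j, kti.get? p = some j → 0 ≤ j ∧ j < (m : Int))
    (a : List Int × List (Option Int) × Option Int × (Int × Int))
    (b : Option Int × (Int × Int))
    (h : sscInv2 kti (pre ++ x :: rest) m pre.length a b) :
    sscInv2 kti (pre ++ x :: rest) m (pre.length + 1)
      (sscStepA (m : Int) kti a ((pre.length : Int), x))
      (sscStepB (m : Int) kti (pre ++ x :: rest) b ((pre.length : Int), x)) := by
  obtain ⟨lat, ssl, dist, res⟩ := a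
  obtain ⟨best, resB⟩ := b
  obtain ⟨hl1, hl2, hdb, hrr, hlast, hssl⟩ := h
  simp only at hl1 hl2 hdb hrr hlast hssl
  subst hdb; subst hrr
  have hxt : (pre ++ x :: rest).getD pre.length "" = x := ssc_getD_append pre rest x ""
  cases hget : kti.get? x with
  | none =>
    have hbB : (kti.get? x == some ((m : Int) - 1)) = false := by
      simp [hget]
    simp only [sscStepA, sscStepB, hget]
    refine ⟨hl1, hl2, rfl, rfl, ?_, hssl⟩
    intro jn hjn
    exact ssc_last_extend kti _ pre.length _ _ (hlast jn hjn)
      (by simp [sscOcc, hget])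
  | some j =>
    obtain ⟨hj0, hjm⟩ := hk _ _ hget
    obtain ⟨jn, rfl⟩ : ∃ n : Nat, j = (n : Int) := ⟨j.toNat, by omega⟩
    have hjnm : jn < m := by exact_mod_cast hjm
    have hoccj : sscOcc kti (pre ++ x :: rest) jn pre.length := by
      simp only [sscOcc, hxt, hget]
    simp only [sscStepA, sscStepB, hget]
    obtain ⟨hlen', hval', hoth'⟩ := ssc_key kti (pre ++ x :: rest) m pre.length lat ssl hl2
      hlast hssl jn hjnm
    set ssl' := sscNewSsl (pre.length : Int) (jn : Int) lat ssl with hssl'def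
    have hlat' : PySem.List.pySetD lat (jn : Int) (pre.length : Int)
        = lat.set jn (pre.length : Int) := by simp [PySem.List.pySetD_natCast]
    -- the updated arrays satisfy the two per-level invariants at t+1
    have hlast' : ∀ jn' : Nat, jn' < m →
        sscLast kti (pre ++ x :: rest) (pre.length + 1) jn'
          ((lat.set jn (pre.length : Int)).getD jn' 0) := by
      intro jn' hjn'
      rcases eq_or_ne jn' jn with rfl | hne
      · rw [ssc_getD_set _ _ _ _ _ (by rw [hl1]; exact hjnm), if_pos rfl]
        right
        refine ⟨by omega, by push_cast; omega, by simpa using hoccj, ?_⟩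
        intro p hp1 hp2
        omega
      · rw [ssc_getD_set _ _ _ _ _ (by rw [hl1]; exact hjnm), if_neg hne]
        refine ssc_last_extend kti _ pre.length _ _ (hlast jn' hjn') ?_
        simp only [sscOcc, hxt, hget]
        intro hc
        exact hne (by exact_mod_cast (Option.some.inj hc).symm)
    have hssl2 : ∀ jn' : Nat, jn' < m → ssl'.getD jn' none =
        (if (lat.set jn (pre.length : Int)).getD jn' 0 < 0 then none
         else sscW kti (pre ++ x :: rest) jn'
           (((lat.set jn (pre.length : Int)).getD jn' 0).toNat)) := by
      intro jn' hjn'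
      rcases eq_or_ne jn' jn with rfl | hne
      · rw [ssc_getD_set _ _ _ _ _ (by rw [hl1]; exact hjnm), if_pos rfl, if_neg (by omega),
          Int.toNat_natCast, hval']
      · rw [hoth' jn' hne, ssc_getD_set _ _ _ _ _ (by rw [hl1]; exact hjnm), if_neg hne, hssl jn' hjn']
    -- now compare the two update conditions
    by_cases hlastkw : jn = m - 1 ∧ 1 ≤ m
    · have hbA : ((jn : Int) == (m : Int) - 1) = true := beq_iff_eq.mpr (by omega)
      have hbB : ((some ((jn : Nat) : Int) : Option Int) == some ((m : Int) - 1)) = true := by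
        rw [beq_iff_eq]; congr 1; omega
      have hne : ssl' ≠ [] := by
        intro hc; rw [hc] at hlen'; simp at hlen'; omega
      have hneg1 : PySem.List.pyGetD ssl' (-1) none = sscW kti (pre ++ x :: rest) jn pre.length := by
        rw [ssc_pyGetD_neg_one_eq_getD ssl' none hne, hlen',
          show m - 1 = jn by omega, hval']
      have htoNat : ((pre.length : Int)).toNat = pre.length := by simp
      have hjc : ((jn : Int)) - 1 = (m : Int) - 2 := by omega
      simp only [htoNat]
      set r := sscBack kti (pre ++ x :: rest) ((m : Int) - 2) pre.length with hrdef
      have hWr : sscW kti (pre ++ x :: rest) jn pre.length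
          = (if r.1 < 0 then some ((pre.length : Int) - r.2) else none) := by
        simp only [sscW, hjc, hrdef]
      simp only [hbA, Bool.true_and, hbB, if_true, hneg1, hWr, hlat']
      by_cases hsucc : r.1 < 0
      · simp only [if_pos hsucc]
        have hres : (((pre.length : Int) - ((pre.length : Int) - r.2) + 1, (pre.length : Int)) : Int × Int)
            = (r.2 + 1, (pre.length : Int)) := by
          rw [Prod.mk.injEq]; exact ⟨by ring, rfl⟩
        cases dist with
        | none =>
          simp only [sscOptLt, Option.elim, if_true, Option.getD_some]
          exact ⟨by simp [hl1], hlen', rfl, hres, hlast', hssl2⟩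
        | some bb =>
          simp only [sscOptLt, Option.elim, Option.getD_some]
          by_cases hlt : (pre.length : Int) - r.2 < bb
          · simp only [decide_eq_true hlt, if_true]
            exact ⟨by simp [hl1], hlen', rfl, hres, hlast', hssl2⟩
          · simp only [decide_eq_false hlt, Bool.false_eq_true, if_false]
            exact ⟨by simp [hl1], hlen', rfl, rfl, hlast', hssl2⟩
      · simp only [if_neg hsucc]
        have hcond : sscOptLt none dist = false := by cases dist <;> rfl
        simp only [hcond, Bool.false_eq_true, if_false]
        exact ⟨by simp [hl1], hlen', rfl, rfl, hlast', hssl2⟩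
    · have hbA : ((jn : Int) == (m : Int) - 1) = false := by
        rw [beq_eq_false_iff_ne]
        intro hc; exact hlastkw ⟨by omega, by omega⟩
      have hbB : ((some ((jn : Nat) : Int) : Option Int) == some ((m : Int) - 1)) = false := by
        rw [beq_eq_false_iff_ne]
        intro hc
        have := Option.some.inj hc
        exact hlastkw ⟨by omega, by omega⟩
      simp only [hbA, Bool.false_and, Bool.false_eq_true, if_false, hbB, hlat']
      exact ⟨by simp [hl1], hlen', rfl, rfl, hlast', hssl2⟩

lemma ssc_fold2 (kti : PySem.Dict String Int) (m : Nat)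
    (hk : ∀ p j, kti.get? p = some j → 0 ≤ j ∧ j < (m : Int)) :
    ∀ (rest pre : List String) a b,
      sscInv2 kti (pre ++ rest) m pre.length a b →
      sscInv2 kti (pre ++ rest) m (pre.length + rest.length)
        ((PySem.List.enumerate rest (pre.length : Int)).foldl (sscStepA (m : Int) kti) a)
        ((PySem.List.enumerate rest (pre.length : Int)).foldl
          (sscStepB (m : Int) kti (pre ++ rest)) b) := by
  intro rest
  induction rest with
  | nil => intro pre a b h; simpa [PySem.List.enumerate_nil] using h
  | cons x rest' ih =>
    intro pre a b h
    rw [PySem.List.enumerate_cons]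
    simp only [List.foldl_cons]
    have hstep := ssc_step2 kti pre x rest' m hk a b h
    have := ih (pre ++ [x])
      (sscStepA (m : Int) kti a ((pre.length : Int), x))
      (sscStepB (m : Int) kti (pre ++ x :: rest') b ((pre.length : Int), x))
      (by simpa [List.append_assoc] using hstep)
    simp only [List.append_assoc, List.cons_append, List.nil_append,
      List.length_append, List.length_cons, List.length_nil] at this ⊢
    have hcast : (((pre.length + 1 : Nat)) : Int) = ((pre.length : Int) + 1) := by push_cast; ring
    rw [show pre.length + (rest'.length + 1) = pre.length + 1 + rest'.length by omega]
    rw [hcast] at this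
    exact this

-- ===== VERDICT (by name: the statement is the Claim_ definition above) =====
theorem smallest_sequentially_covering_spec : Claim_equal_smallest_sequentially_covering := by
  intro paragraph keywords _
  unfold Spec_smallest_sequentially_covering
  show smallest_sequentially_covering paragraph keywords
      = smallest_sequentially_covering_alt paragraph keywords
  have hinv : sscInv2
      ((PySem.List.enumerate keywords 0).foldl (fun d ik => d.insert ik.2 ik.1) PySem.Dict.empty)
      paragraph keywords.length 0
      (List.replicate keywords.length (-1), List.replicate keywords.length none,
        none, (-1, -1)) (none, (-1, -1)) := by
    refine ⟨by simp, by simp, rfl, rfl, ?_, ?_⟩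
    · intro jn hjn
      left
      constructor
      · simp [List.getD_eq_getElem?_getD, hjn]
      · intro p hp; omega
    · intro jn hjn
      simp [List.getD_eq_getElem?_getD, hjn]
  have hfold := ssc_fold2
    ((PySem.List.enumerate keywords 0).foldl (fun d ik => d.insert ik.2 ik.1) PySem.Dict.empty)
    keywords.length (fun p j hj => ssc_dict_range keywords p j hj) paragraph []
    (List.replicate keywords.length (-1), List.replicate keywords.length none,
      none, (-1, -1)) (none, (-1, -1))
    (by simpa using hinv)
  simp only [List.nil_append, List.length_nil, Nat.cast_zero] at hfold
  obtain ⟨-, -, -, hres, -, -⟩ := hfold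
  exact hres
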